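-- pv_equiv track=rewrite | github.com/jkl46/Advent-of-code-2023 | day9/main.py | getNextValue
-- ===== SOURCE A (Python) =====
-- def getNextValue(line):
-- 	sequences = [line]
-- 	lastValues = line[-1]
-- 	while sequences[-1][-1] != 0 and len(sequences[-1]) != 1:
-- 		cLine = sequences[-1]
--
-- 		sequences.append([])
--
-- 		for n1, n2 in zip(cLine, cLine[1:]):
-- 			sequences[-1].append(n1 - n2)
-- 		lastValues += abs(sequences[-1][-1])
--
-- 	return lastValues
-- ===== SOURCE B (Python) =====
-- def getNextValue(line):
--     # Binomial-coefficient formulation: the last element of the k-th difference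
--     # row is a fixed signed-binomial combination of the last k+1 input values,
--     # so we update a coefficient row (signed Pascal's triangle) instead of
--     # building the difference rows themselves.
--     n = len(line)
--     total = line[-1]
--     last = line[-1]
--     coeffs = [1]  # coeffs[j] = (-1)^j * C(k, j) for the current level k
--     k = 0
--     while last != 0 and k != n - 1:
--         coeffs = [1] + [b - a for a, b in zip(coeffs, coeffs[1:])] + [-coeffs[-1]]
--         k += 1
--         last = sum(c * x for c, x in zip(coeffs, line[n - 1 - k:]))
--         total += abs(last)
--     return total
-- ===== Notes on version B (the rewrite author's own statement) =====
-- stated objective: alternative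
-- what changed: Instead of materialising each successive difference row, B maintains a signed-binomial coefficient row (Pascal-style update) and obtains each row's last element as a dot product of the coefficients with the tail of the input.
import Mathlib
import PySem

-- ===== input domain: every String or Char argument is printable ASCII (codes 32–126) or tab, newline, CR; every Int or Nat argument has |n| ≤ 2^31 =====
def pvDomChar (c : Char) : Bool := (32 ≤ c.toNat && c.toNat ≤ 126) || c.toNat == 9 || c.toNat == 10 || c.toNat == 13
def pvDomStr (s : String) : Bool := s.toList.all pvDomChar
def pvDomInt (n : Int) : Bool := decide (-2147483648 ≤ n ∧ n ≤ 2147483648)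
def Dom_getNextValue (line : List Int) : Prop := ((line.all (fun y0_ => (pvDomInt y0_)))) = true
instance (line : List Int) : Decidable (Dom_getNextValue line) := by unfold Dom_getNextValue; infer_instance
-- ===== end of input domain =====

-- B replaces A's explicit difference-row construction by an iteratively updated signed-binomial
-- coefficient row applied to the tail of the input (alternative algorithm, same asymptotic cost).

-- ===== PORT A =====
-- A's while loop; sequences only ever has its last row read, so the loop state is that row (cur)
-- together with the accumulator lastValues.

def getNextValueLoop (cur : List Int) (lastValues : Int) : Int :=
  if PySem.List.pyGetD cur (-1) 0 ≠ 0 ∧ cur.length ≠ 1 then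
    let nxt := (cur.zip cur.tail).map (fun p => p.1 - p.2)
    getNextValueLoop nxt (lastValues + |PySem.List.pyGetD nxt (-1) 0|)
  else lastValues
  termination_by cur.length
  decreasing_by
    cases cur with
    | nil => simp [PySem.List.pyGetD, PySem.List.pyGet?] at *
    | cons a l => simp [List.length_zip]

def getNextValue (line : List Int) : Int :=
  -- last element of line; the 0 default is only read where Python raises IndexError (empty input, outside Pre_)
  getNextValueLoop line (PySem.List.pyGetD line (-1) 0)

-- ===== PORT B =====
-- the while loop of Source B; fuel (= line.length at the call site) only makes the recursion
-- structural: the loop runs at most n - 1 times, so the 0-fuel branch is never reached.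
def getNextValueAltLoop (line : List Int) (n : Int) (total last : Int) (coeffs : List Int) (k : Int) (fuel : Nat) : Int :=
  match fuel with
  | 0 => total
  | fuel' + 1 =>
    if last ≠ 0 ∧ k ≠ n - 1 then
      let coeffs' := [1] ++ ((coeffs.zip coeffs.tail).map (fun p => p.2 - p.1) ++ [-(PySem.List.pyGetD coeffs (-1) 0)])
      let k' := k + 1
      let last' := ((coeffs'.zip (PySem.List.slice line (some (n - 1 - k')) none)).map (fun p => p.1 * p.2)).sum
      getNextValueAltLoop line n (total + |last'|) last' coeffs' k' fuel'
    else total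


def getNextValue_alt (line : List Int) : Int :=
  let n : Int := (line.length : Int)
  getNextValueAltLoop line n (PySem.List.pyGetD line (-1) 0) (PySem.List.pyGetD line (-1) 0) [1] 0 line.length

-- ===== PRECONDITION & SPEC =====
-- Pre_ excludes only the empty list, on which Python A raises IndexError reading the last element.
def Pre_getNextValue (line : List Int) : Prop := line ≠ []
instance (line : List Int) : Decidable (Pre_getNextValue line) := by unfold Pre_getNextValue; infer_instance

def pvWitness_getNextValue : List Int := [1, 2, 3]

def Spec_getNextValue (line : List Int) (out : Int) : Prop := out = getNextValue_alt line
instance (line : List Int) (out : Int) : Decidable (Spec_getNextValue line out) := by unfold Spec_getNextValue; infer_instance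

-- ===== CLAIM (what is proved, stated in full; the proofs are below) =====
def Claim_equal_getNextValue : Prop := ∀ (line : List Int), Dom_getNextValue line → Pre_getNextValue line → Spec_getNextValue line (getNextValue line)

-- ===== LEMMAS AND PROOFS =====

def applyC (c l : List Int) : Int := ((c.zip l).map (fun p => p.1 * p.2)).sum
@[simp] lemma applyC_nil_left (l : List Int) : applyC [] l = 0 := rfl
@[simp] lemma applyC_nil_right (c : List Int) : applyC c [] = 0 := by cases c <;> rfl
@[simp] lemma applyC_cons (a x : Int) (c l : List Int) :
    applyC (a :: c) (x :: l) = a * x + applyC c l := rfl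

def extC (c : List Int) : List Int :=
  (c.zip c.tail).map (fun p => p.2 - p.1) ++ [-(PySem.List.pyGetD c (-1) 0)]

lemma extC_cons₂ (c0 c1 : Int) (cs : List Int) :
    extC (c0 :: c1 :: cs) = (c1 - c0) :: extC (c1 :: cs) := by
  simp [extC, PySem.List.pyGetD_neg_one, List.getLast_cons]

lemma extC_apply (cs : List Int) (c0 : Int) (l : List Int) :
    applyC (extC (c0 :: cs)) l = applyC cs l - applyC (c0 :: cs) l := by
  induction cs generalizing c0 l with
  | nil =>
    cases l with
    | nil => simp [extC]
    | cons y l₂ =>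
      simp [extC, PySem.List.pyGetD_neg_one]
  | cons c1 cs' ih =>
    cases l with
    | nil => simp
    | cons y l₂ =>
      rw [extC_cons₂]
      simp only [applyC_cons, ih c1 l₂]
      ring

lemma step_apply (cs l : List Int) :
    applyC (1 :: extC (1 :: cs)) l = applyC (1 :: cs) l - applyC (1 :: cs) l.tail := by
  cases l with
  | nil => simp
  | cons x l₂ =>
    simp only [applyC_cons, List.tail_cons, extC_apply]
    ring

def diffL (l : List Int) : List Int := (l.zip l.tail).map (fun p => p.1 - p.2)

lemma diffL_length (l : List Int) : (diffL l).length = l.length - 1 := by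
  simp [diffL, List.length_zip]

lemma diffL_getD (l : List Int) (i : Nat) (h : i + 1 < l.length) :
    (diffL l).getD i 0 = l.getD i 0 - l.getD (i + 1) 0 := by
  have hlen : i < (diffL l).length := by rw [diffL_length]; omega
  rw [List.getD_eq_getElem _ _ hlen, List.getD_eq_getElem _ _ (by omega : i < l.length),
    List.getD_eq_getElem _ _ h]
  simp [diffL, List.getElem_zip, List.getElem_tail]

lemma pyGetD_last (l : List Int) (h : l ≠ []) :
    PySem.List.pyGetD l (-1) 0 = l.getD (l.length - 1) 0 := by
  rw [PySem.List.pyGetD_neg_one l 0 h, List.getLast_eq_getElem,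
    List.getD_eq_getElem l 0 (by cases l with | nil => simp at h | cons a t => simp)]

lemma altLoop_stop (line : List Int) (n total last : Int) (coeffs : List Int) (k : Int) (fuel : Nat)
    (h : ¬(last ≠ 0 ∧ k ≠ n - 1)) :
    getNextValueAltLoop line n total last coeffs k (fuel + 1) = total := by
  simp only [getNextValueAltLoop]
  rw [if_neg h]

lemma altLoop_succ (line : List Int) (n total last : Int) (coeffs : List Int) (k : Int) (fuel : Nat)
    (h1 : last ≠ 0) (h2 : k ≠ n - 1) :
    getNextValueAltLoop line n total last coeffs k (fuel + 1) =
      getNextValueAltLoop line n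
        (total + |applyC (1 :: extC coeffs) (PySem.List.slice line (some (n - 1 - (k + 1))) none)|)
        (applyC (1 :: extC coeffs) (PySem.List.slice line (some (n - 1 - (k + 1))) none))
        (1 :: extC coeffs) (k + 1) fuel := by
  simp only [getNextValueAltLoop]
  rw [if_pos ⟨h1, h2⟩]
  rfl

lemma loopA_succ (cur : List Int) (total : Int)
    (h : PySem.List.pyGetD cur (-1) 0 ≠ 0 ∧ cur.length ≠ 1) :
    getNextValueLoop cur total =
      getNextValueLoop (diffL cur) (total + |PySem.List.pyGetD (diffL cur) (-1) 0|) := by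
  rw [getNextValueLoop]
  rw [if_pos h]
  rfl

lemma loopA_stop (cur : List Int) (total : Int)
    (h : ¬(PySem.List.pyGetD cur (-1) 0 ≠ 0 ∧ cur.length ≠ 1)) :
    getNextValueLoop cur total = total := by
  rw [getNextValueLoop]
  rw [if_neg h]

lemma loop_eq (fuel : Nat) : ∀ (cur cs : List Int) (k : Nat) (total : Int) (line : List Int),
    cur ≠ [] →
    cur.length + k = line.length →
    cur.length ≤ fuel + 1 →
    (∀ i : Nat, i < cur.length → cur.getD i 0 = applyC (1 :: cs) (line.drop i)) →
    getNextValueAltLoop line (line.length : Int) total (PySem.List.pyGetD cur (-1) 0) (1 :: cs) (k : Int) fuel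
      = getNextValueLoop cur total := by
  induction fuel with
  | zero =>
    intro cur cs k total line hne hlen hfuel _
    have hpos : 0 < cur.length := List.length_pos_of_ne_nil hne
    have h1 : cur.length = 1 := by omega
    rw [loopA_stop cur total (by simp [h1])]
    rfl
  | succ fuel ih =>
    intro cur cs k total line hne hlen hfuel hW
    have hpos : 0 < cur.length := List.length_pos_of_ne_nil hne
    by_cases hg : PySem.List.pyGetD cur (-1) 0 ≠ 0 ∧ cur.length ≠ 1
    · -- loop body runs on both sides
      have hcl2 : 2 ≤ cur.length := by
        rcases Nat.lt_or_ge cur.length 2 with h | h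
        · exact absurd (by omega) hg.2
        · exact h
      have hk : (k : Int) ≠ (line.length : Int) - 1 := by omega
      -- the index n - 1 - (k + 1) of the slice, as a natural number
      have hidx : (line.length : Int) - 1 - ((k : Int) + 1) = ((line.length - k - 2 : Nat) : Int) := by omega
      set m : Nat := line.length - k - 2 with hm
      have hslice : PySem.List.slice line (some ((line.length : Int) - 1 - ((k : Int) + 1))) none = line.drop m := by
        rw [hidx, PySem.List.slice_from_natCast]
      have hnxtlen : (diffL cur).length = cur.length - 1 := diffL_length cur
      have hnxtne : diffL cur ≠ [] := by
        intro hnil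
        rw [hnil] at hnxtlen
        simp at hnxtlen
        omega
      -- the new window property
      have hW' : ∀ i : Nat, i < (diffL cur).length →
          (diffL cur).getD i 0 = applyC (1 :: extC (1 :: cs)) (line.drop i) := by
        intro i hi
        rw [hnxtlen] at hi
        rw [diffL_getD cur i (by omega), hW i (by omega), hW (i + 1) (by omega),
          step_apply, List.tail_drop]
      -- B's new last value is the last entry of A's next row
      have hlast : applyC (1 :: extC (1 :: cs)) (line.drop m) = PySem.List.pyGetD (diffL cur) (-1) 0 := by
        rw [pyGetD_last (diffL cur) hnxtne, hnxtlen]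
        rw [hW' (cur.length - 1 - 1) (by omega)]
        have : cur.length - 1 - 1 = m := by omega
        rw [this]
      rw [loopA_succ cur total hg]
      rw [altLoop_succ line _ total _ (1 :: cs) (k : Int) fuel hg.1 hk]
      rw [hslice, hlast]
      have hcast : (k : Int) + 1 = ((k + 1 : Nat) : Int) := by omega
      rw [hcast]
      exact ih (diffL cur) (extC (1 :: cs)) (k + 1) (total + |PySem.List.pyGetD (diffL cur) (-1) 0|) line
        hnxtne (by omega) (by omega) hW'
    · -- both loops stop and return total
      rw [loopA_stop cur total hg]
      apply altLoop_stop
      intro hB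
      apply hg
      refine ⟨hB.1, ?_⟩
      intro h1
      exact hB.2 (by omega)

lemma window_init (line : List Int) : ∀ i : Nat, i < line.length →
    line.getD i 0 = applyC (1 :: ([] : List Int)) (line.drop i) := by
  intro i hi
  rw [List.getD_eq_getElem line 0 hi, List.drop_eq_getElem_cons hi, applyC_cons]
  simp

-- ===== VERDICT (by name: the statement is the Claim_ definition above) =====
theorem getNextValue_spec : Claim_equal_getNextValue := by
  intro line _ hpre
  show getNextValue line = getNextValue_alt line
  have h := loop_eq line.length line [] 0 (PySem.List.pyGetD line (-1) 0) line hpre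
    (by omega) (by omega) (window_init line)
  simpa [getNextValue, getNextValue_alt] using h.symm
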